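-- pv_equiv track=rewrite | github.com/eflipe/python-exercises | codewars/string_vowels.py | gordon
-- ===== SOURCE A (Python) =====
-- def gordon(s):
--     out = ''
--     for c in s.upper():
--         if c == 'A':
--             out += '@'
--         elif c in 'EIOU':
--             out += '*'
--         elif c == ' ':
--             out += '!!!! '
--         else:
--             out += c
--     return out + '!!!!'
-- ===== SOURCE B (Python) =====
-- def gordon(s):
--     up = s.upper()
--     # staged whole-string passes; replacement outputs are never re-scanned by later passes
--     # ('@' and '*' match no later pattern, and the space mapping runs last)
--     return (up.replace('A', '@')
--               .replace('E', '*')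
--               .replace('I', '*')
--               .replace('O', '*')
--               .replace('U', '*')
--               .replace(' ', '!!!! ')) + '!!!!'
-- ===== Notes on version B (the rewrite author's own statement) =====
-- stated objective: idiomatic
-- what changed: Replaces A's single per-character if/elif accumulation loop with six staged whole-string str.replace passes (one per substitution), correct because no replacement output is matched by a later pass.
import Mathlib
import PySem

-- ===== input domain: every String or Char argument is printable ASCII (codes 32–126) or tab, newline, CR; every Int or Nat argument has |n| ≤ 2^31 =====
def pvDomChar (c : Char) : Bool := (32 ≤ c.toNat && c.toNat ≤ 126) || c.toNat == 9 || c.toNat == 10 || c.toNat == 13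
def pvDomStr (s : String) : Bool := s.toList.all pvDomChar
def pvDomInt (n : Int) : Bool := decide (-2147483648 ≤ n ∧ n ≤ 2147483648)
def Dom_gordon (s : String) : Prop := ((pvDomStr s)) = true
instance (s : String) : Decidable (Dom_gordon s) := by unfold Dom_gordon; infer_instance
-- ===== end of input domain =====

-- B replaces A's per-character if/elif accumulation loop by six staged whole-string
-- str.replace passes (objective: idiomatic).

-- ===== PORT A =====
-- literal port of A: fold over the uppercased characters, appending per-branch.
def gordon (s : String) : String :=
  String.ofList
    (((PySem.Str.upper s).toList.foldl
      (fun out c =>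
        if c = 'A' then out ++ ['@']
        else if c ∈ "EIOU".toList then out ++ ['*']
        else if c = ' ' then out ++ "!!!! ".toList
        else out ++ [c]) []) ++ "!!!!".toList)

-- ===== PORT B =====
-- s.upper() then six chained whole-string replace passes, then the '!!!!' suffix.
def gordon_alt (s : String) : String :=
  (PySem.Str.replace
    (PySem.Str.replace
      (PySem.Str.replace
        (PySem.Str.replace
          (PySem.Str.replace
            (PySem.Str.replace (PySem.Str.upper s) "A" "@")
            "E" "*")
          "I" "*")
        "O" "*")
      "U" "*")
    " " "!!!! ") ++ "!!!!"

-- ===== PRECONDITION & SPEC =====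
def Spec_gordon (s : String) (out : String) : Prop := out = gordon_alt s
instance (s : String) (out : String) : Decidable (Spec_gordon s out) := by unfold Spec_gordon; infer_instance

-- ===== CLAIM (what is proved, stated in full; the proofs are below) =====
def Claim_equal_gordon : Prop := ∀ (s : String), Dom_gordon s → Spec_gordon s (gordon s)

-- ===== LEMMAS AND PROOFS =====

-- Python replace with a single-character pattern is a flatMap over the characters.
theorem replace_go_single (a : Char) (new : List Char) :
    ∀ (fuel : Nat) (l acc : List Char), l.length ≤ fuel →
      PySem.Chars.replace.go [a] new fuel l acc
        = acc.reverse ++ l.flatMap (fun c => if c = a then new else [c]) := by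
  intro fuel
  induction fuel with
  | zero =>
    intro l acc h
    cases l with
    | nil => simp [PySem.Chars.replace.go]
    | cons c t => simp at h
  | succ n ih =>
    intro l acc h
    cases l with
    | nil => simp [PySem.Chars.replace.go]
    | cons c t =>
      simp only [PySem.Chars.replace.go]
      by_cases hc : c = a
      · subst hc
        rw [if_pos (by simp [List.isPrefixOf])]
        simp only [List.length_cons] at h
        have hdrop : List.drop (List.length [c]) (c :: t) = t := by simp
        rw [hdrop, ih t (new.reverse ++ acc) (by omega)]
        simp
      · rw [if_neg (by simp [List.isPrefixOf]; exact fun h' => hc h'.symm)]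
        simp only [List.length_cons] at h
        rw [ih t (c :: acc) (by omega)]
        simp [hc]

theorem replace_single (a : Char) (new l : List Char) :
    PySem.Chars.replace l [a] new
      = l.flatMap (fun c => if c = a then new else [c]) := by
  rw [PySem.Chars.replace]
  rw [if_neg (by simp)]
  rw [replace_go_single a new l.length l [] (le_refl _)]
  simp

-- composing the six per-pass substitution functions gives A's branch chain
theorem branch_eq (c : Char) :
    (List.flatMap (fun x1 =>
       List.flatMap (fun x2 =>
         List.flatMap (fun x3 =>
           List.flatMap (fun x4 =>
             List.flatMap (fun d => if d = ' ' then "!!!! ".toList else [d])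
               (if x4 = 'U' then "*".toList else [x4]))
             (if x3 = 'O' then "*".toList else [x3]))
           (if x2 = 'I' then "*".toList else [x2]))
         (if x1 = 'E' then "*".toList else [x1]))
       (if c = 'A' then "@".toList else [c]))
      = (if c = 'A' then ['@']
         else if c ∈ "EIOU".toList then ['*']
         else if c = ' ' then "!!!! ".toList
         else [c]) := by
  by_cases h1 : c = 'A'; · subst h1; decide
  by_cases h2 : c = 'E'; · subst h2; decide
  by_cases h3 : c = 'I'; · subst h3; decide
  by_cases h4 : c = 'O'; · subst h4; decide
  by_cases h5 : c = 'U'; · subst h5; decide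
  by_cases h6 : c = ' '; · subst h6; decide
  simp [h1, h2, h3, h4, h5, h6]

-- ===== VERDICT (by name: the statement is the Claim_ definition above) =====
set_option maxHeartbeats 1000000 in
theorem gordon_spec : Claim_equal_gordon := by
  intro s _
  unfold Spec_gordon gordon gordon_alt
  apply String.toList_injective
  simp only [String.toList_append, PySem.Str.toList_replace, String.toList_ofList]
  rw [show ("A" : String).toList = ['A'] by decide,
      show ("E" : String).toList = ['E'] by decide,
      show ("I" : String).toList = ['I'] by decide,
      show ("O" : String).toList = ['O'] by decide,
      show ("U" : String).toList = ['U'] by decide,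
      show (" " : String).toList = [' '] by decide]
  simp only [replace_single]
  rw [PySem.List.foldl_congr_mem _ _
      (fun out c => out ++
        (if c = 'A' then ['@']
         else if c ∈ "EIOU".toList then ['*']
         else if c = ' ' then "!!!! ".toList
         else [c])) []
      (by intro acc c _; dsimp only; split_ifs <;> rfl)]
  rw [PySem.List.foldl_append_eq_flatMap]
  simp only [List.flatMap_assoc, List.nil_append]
  congr 1
  congr 1
  funext c
  exact (branch_eq c).symm
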